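-- pv_equiv track=rewrite | github.com/Miguel477713/PrecedenceRelationsOfTraces | automata.py | UnfoldOneCycleAutomatically
-- ===== SOURCE A (Python) =====
-- from typing import Dict, FrozenSet, List, Optional, Sequence, Set, Tuple
--
-- def FindOneDirectedCycle(edges: Set[Tuple[str, str]]) -> Optional[List[str]]:
--     """
--     Iterative cycle detection (no recursion).
--     Returns a cycle like [v0, v1, ..., v0] if found; otherwise None.
--     """
--     adjacency: Dict[str, List[str]] = {}
--     allNodes: Set[str] = set()
--
--     for (source, target) in edges:
--         adjacency.setdefault(source, []).append(target)
--         allNodes.add(source)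
--         allNodes.add(target)
--
--     for node in adjacency.keys():
--         adjacency[node].sort()
--
--     visitState: Dict[str, int] = {node: 0 for node in allNodes}  # 0=unvisited, 1=visiting, 2=finished
--     parent: Dict[str, Optional[str]] = {node: None for node in allNodes}
--
--     for startNode in sorted(allNodes):
--         if visitState[startNode] != 0:
--             continue
--
--         stack: List[Tuple[str, int]] = [(startNode, 0)]
--         visitState[startNode] = 1
--         parent[startNode] = None
--
--         while stack:
--             currentNode, nextNeighborIndex = stack[-1]
--             neighbors = adjacency.get(currentNode, [])
--
--             if nextNeighborIndex >= len(neighbors):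
--                 visitState[currentNode] = 2
--                 stack.pop()
--                 continue
--
--             neighbor = neighbors[nextNeighborIndex]
--             stack[-1] = (currentNode, nextNeighborIndex + 1)
--
--             if visitState.get(neighbor, 0) == 0:
--                 visitState[neighbor] = 1
--                 parent[neighbor] = currentNode
--                 stack.append((neighbor, 0))
--             elif visitState.get(neighbor, 0) == 1:
--                 cycleNodesReversed: List[str] = [currentNode]
--                 walkNode = currentNode
--                 while walkNode != neighbor and parent[walkNode] is not None:
--                     walkNode = parent[walkNode]
--                     cycleNodesReversed.append(walkNode)
--
--                 cycleNodesReversed.reverse()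
--                 cycleNodes = cycleNodesReversed + [neighbor]
--                 return cycleNodes
--
--     return None
--
-- def CreateUniqueDuplicateNodeName(originalNodeName: str, usedNodeNames: Set[str]) -> str:
--     duplicateIndex = 1
--     while True:
--         candidateName = f"{originalNodeName}Prime{duplicateIndex}"
--         if candidateName not in usedNodeNames:
--             return candidateName
--         duplicateIndex += 1
--
-- def UnfoldOneCycleAutomatically(
--     edges: Set[Tuple[str, str]],
--     usedNodeNames: Set[str],
-- ) -> Tuple[Set[Tuple[str, str]], Optional[str]]:
--     """
--     Unfold exactly one cycle by duplicating the cycle-entry node (cycle[0]),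
--     redirecting ONLY the closing edge into the duplicate node.
--
--     IMPORTANT FIX:
--     Do NOT copy outgoing edges from the original node into the duplicate node.
--     Copying outgoing edges can reintroduce cycles and prevent termination.
--     """
--     cycle = FindOneDirectedCycle(edges)
--     if cycle is None:
--         return (set(edges), None)
--
--     cycleEntryNode = cycle[0]
--     duplicateNodeName = CreateUniqueDuplicateNodeName(cycleEntryNode, usedNodeNames)
--
--     cycleEdges: List[Tuple[str, str]] = []
--     for index in range(len(cycle) - 1):
--         cycleEdges.append((cycle[index], cycle[index + 1]))
--
--     closingEdge = cycleEdges[-1]  # ( ... -> cycleEntryNode )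
--
--     newEdges: Set[Tuple[str, str]] = set(edges)
--
--     if closingEdge in newEdges:
--         newEdges.remove(closingEdge)
--
--     newEdges.add((closingEdge[0], duplicateNodeName))
--
--     usedNodeNames.add(duplicateNodeName)
--     return (newEdges, duplicateNodeName)
-- ===== SOURCE B (Python) =====
-- def FindOneDirectedCycle(edges):
--     """Recursive DFS returning a cycle like [v0, ..., v0], else None."""
--     adjacency = {}
--     allNodes = set()
--     for (source, target) in edges:
--         adjacency.setdefault(source, []).append(target)
--         allNodes.add(source)
--         allNodes.add(target)
--     for node in adjacency.keys():
--         adjacency[node].sort()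
--     visitState = {node: 0 for node in allNodes}  # 0=unvisited, 1=visiting, 2=finished
--
--     def visit(node, path):
--         visitState[node] = 1
--         path = path + [node]
--         for neighbor in adjacency.get(node, []):
--             state = visitState.get(neighbor, 0)
--             if state == 1:
--                 return path[path.index(neighbor):] + [neighbor]
--             if state == 0:
--                 found = visit(neighbor, path)
--                 if found is not None:
--                     return found
--         visitState[node] = 2
--         return None
--
--     for startNode in sorted(allNodes):
--         if visitState[startNode] != 0:
--             continue
--         found = visit(startNode, [])
--         if found is not None:
--             return found
--     return None
--
--
-- def CreateUniqueDuplicateNodeName(originalNodeName, usedNodeNames):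
--     duplicateIndex = 1
--     while True:
--         candidateName = f"{originalNodeName}Prime{duplicateIndex}"
--         if candidateName not in usedNodeNames:
--             return candidateName
--         duplicateIndex += 1
--
--
-- def UnfoldOneCycleAutomatically(edges, usedNodeNames):
--     cycle = FindOneDirectedCycle(edges)
--     if cycle is None:
--         return (set(edges), None)
--
--     duplicateNodeName = CreateUniqueDuplicateNodeName(cycle[0], usedNodeNames)
--     closingEdge = (cycle[-2], cycle[-1])  # cycle ends with its entry node
--
--     newEdges = set(edges)
--     newEdges.discard(closingEdge)
--     newEdges.add((closingEdge[0], duplicateNodeName))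
--
--     usedNodeNames.add(duplicateNodeName)
--     return (newEdges, duplicateNodeName)
-- ===== Notes on version B (the rewrite author's own statement) =====
-- stated objective: alternative
-- what changed: The iterative explicit-stack DFS with a parent map and a parent-pointer walk for cycle reconstruction is replaced by a recursive DFS that carries the current path as a list and reconstructs the cycle by slicing the path at the back-edge target; the closing edge is read directly off the cycle's last two nodes instead of materialising the whole cycle-edge list.
import Mathlib
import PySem

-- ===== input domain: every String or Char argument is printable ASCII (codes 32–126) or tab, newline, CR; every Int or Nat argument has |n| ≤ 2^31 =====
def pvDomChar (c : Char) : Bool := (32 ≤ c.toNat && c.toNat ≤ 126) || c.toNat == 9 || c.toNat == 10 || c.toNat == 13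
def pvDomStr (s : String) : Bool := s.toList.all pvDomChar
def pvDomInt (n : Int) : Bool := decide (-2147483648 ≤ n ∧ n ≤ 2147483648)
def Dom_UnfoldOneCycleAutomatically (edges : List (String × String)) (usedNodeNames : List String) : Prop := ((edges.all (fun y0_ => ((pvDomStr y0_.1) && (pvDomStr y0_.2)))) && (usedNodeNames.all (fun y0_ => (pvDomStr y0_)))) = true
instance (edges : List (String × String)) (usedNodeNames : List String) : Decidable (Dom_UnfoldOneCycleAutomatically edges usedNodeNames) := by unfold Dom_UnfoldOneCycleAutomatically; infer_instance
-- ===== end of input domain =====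

-- B replaces A's iterative explicit-stack DFS (parent map + parent-pointer walk) by a recursive DFS
-- carrying the current path as a list, slicing it at the back-edge target; objective: alternative, same cost.
-- NOTE: the Python functions mutate their set arguments (usedNodeNames.add); the equivalence proved here
-- is about the RETURN value only (both Pythons perform the same mutation).

-- ===== PORT A =====
-- helpers shared verbatim by both Python sources (identical preprocessing lines in Source A and Source B):
def pvBuildAdjacency (edges : List (String × String)) : PySem.Dict String (List String) :=
  -- for (s,t) in edges: adjacency.setdefault(s, []).append(t); then each value list is sorted
  let d := edges.foldl (fun d e => d.modify e.1 [] (fun l => l ++ [e.2])) PySem.Dict.empty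
  PySem.Dict.mk (d.items.map (fun p => (p.1, PySem.List.sorted p.2 (fun x => x) false)))

def pvCollectNodes (edges : List (String × String)) : PySem.Set String :=
  edges.foldl (fun s e => PySem.Set.add (PySem.Set.add s e.1) e.2) PySem.Set.empty

def pvInitVisit (nodes : List String) : PySem.Dict String Int :=
  nodes.foldl (fun d n => d.insert n 0) PySem.Dict.empty

-- CreateUniqueDuplicateNodeName, identical in both sources; the while-True loop carries fuel
-- used.length + 1 (the candidates are pairwise distinct, so some candidate among the first
-- used.length + 1 is free and the fuel is never exhausted).
def pvMkName (base : String) (k : Int) : String := base ++ "Prime" ++ PySem.Int.toStr k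

def pvFindName : Nat → String → List String → Int → String
  | 0, base, _, k => pvMkName base k
  | f + 1, base, used, k =>
    let c := pvMkName base k
    if used.contains c then pvFindName f base used (k + 1) else c

def pvCreateUniqueDuplicateNodeName (base : String) (used : List String) : String :=
  pvFindName (used.length + 1) base used 1

-- A-side: the parent-pointer walk reconstructing the cycle (the inner while of the elif-branch)
def pvWalkA (parent : PySem.Dict String (Option String)) :
    Nat → String → String → List String → List String
  | 0, _, _, acc => acc
  | f + 1, walkNode, nb, acc =>
    if walkNode ≠ nb then
      match parent.getD walkNode none with
      | some p => pvWalkA parent f p nb (acc ++ [p])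
      | none => acc
    else acc

-- A-side: the explicit-stack while loop (stack top at the head; fuel makes the loop total,
-- it never runs out: per start node the loop performs at most |edges| + |nodes| iterations)
def pvLoopA (adj : PySem.Dict String (List String)) :
    Nat → List (String × Nat) → PySem.Dict String Int → PySem.Dict String (Option String) →
    Option (PySem.Dict String Int × PySem.Dict String (Option String) × Option (List String))
  | _, [], visit, parent => some (visit, parent, none)
  | 0, _ :: _, _, _ => none
  | f + 1, (v, i) :: rest, visit, parent =>
    let neighbors := adj.getD v []
    if neighbors.length ≤ i then
      pvLoopA adj f rest (visit.insert v 2) parent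
    else
      let nb := neighbors.getD i ""
      if visit.getD nb 0 = 0 then
        pvLoopA adj f ((nb, 0) :: (v, i + 1) :: rest) (visit.insert nb 1) (parent.insert nb (some v))
      else if visit.getD nb 0 = 1 then
        let rev := pvWalkA parent (rest.length + 1) v nb [v]
        some (visit, parent, some (rev.reverse ++ [nb]))
      else
        pvLoopA adj f ((v, i + 1) :: rest) visit parent

-- A-side: for startNode in sorted(allNodes)
def pvOuterA (adj : PySem.Dict String (List String)) (fuel : Nat) :
    List String → PySem.Dict String Int → PySem.Dict String (Option String) → Option (List String)
  | [], _, _ => none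
  | s :: restNodes, visit, parent =>
    if visit.getD s 0 ≠ 0 then pvOuterA adj fuel restNodes visit parent
    else
      match pvLoopA adj fuel [(s, 0)] (visit.insert s 1) (parent.insert s none) with
      | none => none
      | some (_, _, some c) => some c
      | some (visit', parent', none) => pvOuterA adj fuel restNodes visit' parent'

def pvFindOneDirectedCycleA (edges : List (String × String)) : Option (List String) :=
  let adj := pvBuildAdjacency edges
  let allNodes := pvCollectNodes edges
  let parent0 : PySem.Dict String (Option String) :=
    allNodes.foldl (fun d n => d.insert n none) PySem.Dict.empty
  pvOuterA adj (edges.length + allNodes.length + 1)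
    (PySem.List.sorted allNodes (fun x => x) false) (pvInitVisit allNodes) parent0

def UnfoldOneCycleAutomatically (edges : List (String × String)) (usedNodeNames : List String) :
    (List (String × String)) × Option String :=
  match pvFindOneDirectedCycleA edges with
  | none => (PySem.Set.ofList edges, none)
  | some cycle =>
    let entry := PySem.List.pyGetD cycle 0 ""
    let dup := pvCreateUniqueDuplicateNodeName entry usedNodeNames
    let cycleEdges := (PySem.List.pyRange 0 ((cycle.length : Int) - 1) 1).foldl
      (fun acc idx => acc ++ [(PySem.List.pyGetD cycle idx "", PySem.List.pyGetD cycle (idx + 1) "")]) []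
    let closing := PySem.List.pyGetD cycleEdges (-1) ("", "")
    let e1 := PySem.Set.ofList edges
    let e2 := if PySem.Set.contains e1 closing then (PySem.Set.remove? e1 closing).getD e1 else e1
    (PySem.Set.add e2 (closing.1, dup), some dup)

-- ===== PORT B =====
-- B-side: recursive DFS with the current path carried as a list; fuel (decremented at every
-- neighbour examination and every node finish, exactly one unit per step, threaded through and
-- returned) makes the recursion total; 'min f' f' only normalises the returned fuel for the
-- termination measure (f' ≤ f always holds, so min f' f = f').
mutual
def pvVisitB (adj : PySem.Dict String (List String)) :
    Nat → String → PySem.Dict String Int → List String →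
    Option (Nat × PySem.Dict String Int × Option (List String))
  | f, v, visit, path => pvGoNbrs adj f (adj.getD v []) v (visit.insert v 1) (path ++ [v])
  termination_by f _ _ _ => (f, 1)
  decreasing_by all_goals omega

def pvGoNbrs (adj : PySem.Dict String (List String)) :
    Nat → List String → String → PySem.Dict String Int → List String →
    Option (Nat × PySem.Dict String Int × Option (List String))
  | 0, _, _, _, _ => none
  | f + 1, [], v, visit, _ => some (f, visit.insert v 2, none)
  | f + 1, nb :: ns, v, visit, path =>
    if visit.getD nb 0 = 1 then
      some (f, visit, some (path.drop ((PySem.List.index? path nb).getD 0) ++ [nb]))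
    else if visit.getD nb 0 = 0 then
      match pvVisitB adj f nb visit path with
      | none => none
      | some (f', visit', some c) => some (f', visit', some c)
      | some (f', visit', none) => pvGoNbrs adj (min f' f) ns v visit' path
    else
      pvGoNbrs adj f ns v visit path
  termination_by f _ _ _ _ => (f, 0)
  decreasing_by all_goals (simp_wf; omega)
end

def pvOuterB (adj : PySem.Dict String (List String)) (fuel : Nat) :
    List String → PySem.Dict String Int → Option (List String)
  | [], _ => none
  | s :: restNodes, visit =>
    if visit.getD s 0 ≠ 0 then pvOuterB adj fuel restNodes visit
    else
      match pvVisitB adj fuel s visit [] with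
      | none => none
      | some (_, _, some c) => some c
      | some (_, visit', none) => pvOuterB adj fuel restNodes visit'

def pvFindOneDirectedCycleB (edges : List (String × String)) : Option (List String) :=
  let adj := pvBuildAdjacency edges
  let allNodes := pvCollectNodes edges
  pvOuterB adj (edges.length + allNodes.length + 1)
    (PySem.List.sorted allNodes (fun x => x) false) (pvInitVisit allNodes)

def UnfoldOneCycleAutomatically_alt (edges : List (String × String)) (usedNodeNames : List String) :
    (List (String × String)) × Option String :=
  match pvFindOneDirectedCycleB edges with
  | none => (PySem.Set.ofList edges, none)
  | some cycle =>
    let dup := pvCreateUniqueDuplicateNodeName (PySem.List.pyGetD cycle 0 "") usedNodeNames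
    let closing := (PySem.List.pyGetD cycle (-2) "", PySem.List.pyGetD cycle (-1) "")
    (PySem.Set.add (PySem.Set.discard (PySem.Set.ofList edges) closing) (closing.1, dup), some dup)

-- ===== PRECONDITION & SPEC =====
def Spec_UnfoldOneCycleAutomatically (edges : List (String × String)) (usedNodeNames : List String) (out : (List (String × String)) × Option String) : Prop := out = UnfoldOneCycleAutomatically_alt edges usedNodeNames
instance (edges : List (String × String)) (usedNodeNames : List String) (out : (List (String × String)) × Option String) : Decidable (Spec_UnfoldOneCycleAutomatically edges usedNodeNames out) := by unfold Spec_UnfoldOneCycleAutomatically; infer_instance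

-- ===== CLAIM (what is proved, stated in full; the proofs are below) =====
def Claim_equal_UnfoldOneCycleAutomatically : Prop := ∀ (edges : List (String × String)) (usedNodeNames : List String), Dom_UnfoldOneCycleAutomatically edges usedNodeNames → Spec_UnfoldOneCycleAutomatically edges usedNodeNames (UnfoldOneCycleAutomatically edges usedNodeNames)

-- ===== LEMMAS AND PROOFS =====

-- the node path along the A-side stack, bottom first (top of stack = last element)
def pvPathOf (stack : List (String × Nat)) : List String := (stack.map Prod.fst).reverse

-- the A-side loop invariant
def pvInvS (stack : List (String × Nat)) (visit : PySem.Dict String Int)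
    (parent : PySem.Dict String (Option String)) : Prop :=
  (pvPathOf stack).Nodup ∧
  (∀ x, visit.getD x 0 = 1 ↔ x ∈ pvPathOf stack) ∧
  List.IsChain (fun a b => parent.getD b none = some a) (pvPathOf stack)

-- relation between the A-side loop result and the B-side DFS result
def pvSimPost (adj : PySem.Dict String (List String)) (f : Nat) (rest : List (String × Nat))
    (parent : PySem.Dict String (Option String))
    (ra : Option (PySem.Dict String Int × PySem.Dict String (Option String) × Option (List String)))
    (rb : Option (Nat × PySem.Dict String Int × Option (List String))) : Prop :=
  match rb with
  | none => ra = none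
  | some (_, vis', some c) => 2 ≤ c.length ∧ ∃ p', ra = some (vis', p', some c)
  | some (f', vis', none) =>
      f' < f ∧ (∀ x, vis'.getD x 0 = 1 ↔ x ∈ pvPathOf rest) ∧
      ∃ p', (∀ x ∈ pvPathOf rest, p'.getD x none = parent.getD x none) ∧
        ra = pvLoopA adj f' rest vis' p'

theorem pvWalkA_self (parent : PySem.Dict String (Option String)) (fuel : Nat) (nb : String)
    (acc : List String) : pvWalkA parent fuel nb nb acc = acc := by
  cases fuel <;> simp [pvWalkA]

theorem pvWalk_gen (parent : PySem.Dict String (Option String)) (nb : String) :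
    ∀ (suf pre : List String) (fuel : Nat) (acc : List String)
      (_ : List.IsChain (fun a b => parent.getD b none = some a) (pre ++ nb :: suf))
      (_ : (pre ++ nb :: suf).Nodup) (_ : suf.length ≤ fuel),
      pvWalkA parent fuel ((nb :: suf).getLast (by simp)) nb acc
        = acc ++ ((nb :: suf).dropLast).reverse := by
  intro suf
  induction suf using List.reverseRecOn with
  | nil => intro pre fuel acc _ _ _; simp [pvWalkA_self]
  | append_singleton suf' w ih =>
    intro pre fuel acc hchain hnodup hfuel
    have hcons : nb :: (suf' ++ [w]) = (nb :: suf') ++ [w] := by simp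
    have hnodup2 : ((pre ++ nb :: suf') ++ [w]).Nodup := by
      simpa [List.append_assoc] using hnodup
    have hne : w ≠ nb := by
      have h3 : (nb :: (suf' ++ [w])).Nodup := hnodup.of_append_right
      have : nb ∉ suf' ++ [w] := (List.nodup_cons.mp h3).1
      intro he; exact this (by simp [he])
    have hchain2 : List.IsChain (fun a b => parent.getD b none = some a) ((pre ++ nb :: suf') ++ [w]) := by
      simpa [List.append_assoc] using hchain
    have hlast : parent.getD w none = some ((pre ++ nb :: suf').getLast (by simp)) := by
      rcases List.isChain_append.mp hchain2 with ⟨_, _, hrel⟩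
      exact hrel _ (by simp [List.getLast?_eq_some_getLast]) w rfl
    have hlast2 : (pre ++ nb :: suf').getLast (by simp) = (nb :: suf').getLast (by simp) := by
      rw [List.getLast_append_of_ne_nil]
    obtain ⟨f, rfl⟩ : ∃ f, fuel = f + 1 := by
      cases fuel with
      | zero => simp at hfuel
      | succ f => exact ⟨f, rfl⟩
    have hgl : (nb :: (suf' ++ [w])).getLast (by simp) = w := by
      simp
    rw [hgl, pvWalkA]
    simp only [hne, if_pos, hlast, hlast2, ne_eq, not_false_eq_true]
    rw [ih pre f (acc ++ [(nb :: suf').getLast (by simp)])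
      (hchain2.prefix (by simp [List.append_assoc])) hnodup2.of_append_left (by simpa using hfuel)]
    rw [show (nb :: (suf' ++ [w])).dropLast = nb :: suf' by
      rw [hcons, List.dropLast_concat]]
    conv_rhs => rw [← List.dropLast_append_getLast (show nb :: suf' ≠ [] by simp)]
    simp

theorem pvSimPost_mono (adj : PySem.Dict String (List String)) {f g : Nat}
    {rest : List (String × Nat)} {parent ra rb} (h : pvSimPost adj f rest parent ra rb)
    (hfg : f ≤ g) : pvSimPost adj g rest parent ra rb := by
  rcases rb with _ | ⟨f', vis', _ | c⟩ <;> simp only [pvSimPost] at h ⊢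
  · exact h
  · exact ⟨by omega, h.2⟩
  · exact h

theorem pvChain_congr {p1 p2 : PySem.Dict String (Option String)} :
    ∀ (l : List String), (∀ x ∈ l, p1.getD x none = p2.getD x none) →
    List.IsChain (fun a b => p1.getD b none = some a) l →
    List.IsChain (fun a b => p2.getD b none = some a) l := by
  intro l hag hch
  rw [List.isChain_iff_getElem] at hch ⊢
  intro i hi
  rw [← hag _ (List.getElem_mem _)]
  exact hch i hi

theorem pvPathOf_cons (v : String) (i : Nat) (rest : List (String × Nat)) :
    pvPathOf ((v, i) :: rest) = pvPathOf rest ++ [v] := by simp [pvPathOf]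

theorem pvSim (adj : PySem.Dict String (List String)) :
    ∀ (f : Nat) (v : String) (i : Nat) (rest : List (String × Nat))
      (visit : PySem.Dict String Int) (parent : PySem.Dict String (Option String)),
      pvInvS ((v, i) :: rest) visit parent →
      pvSimPost adj f rest parent
        (pvLoopA adj f ((v, i) :: rest) visit parent)
        (pvGoNbrs adj f ((adj.getD v []).drop i) v visit (pvPathOf ((v, i) :: rest))) := by
  intro f
  induction f using Nat.strong_induction_on with
  | _ f ih =>
  intro v i rest visit parent hinv
  obtain ⟨hnd, hiff, hchain⟩ := hinv
  rw [pvPathOf_cons] at hnd hiff hchain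
  have hvnotmem : v ∉ pvPathOf rest := by
    intro hm
    have := List.disjoint_of_nodup_append hnd hm
    simp at this
  rcases f with _ | f
  · simp [pvLoopA, pvGoNbrs, pvSimPost]
  by_cases hlen : (adj.getD v []).length ≤ i
  · -- pop step: mark v finished, continue with rest
    have hdrop : (adj.getD v []).drop i = [] := by
      rw [List.drop_eq_nil_iff]; omega
    rw [hdrop, pvGoNbrs, pvLoopA]
    simp only [hlen, if_pos, pvSimPost]
    refine ⟨by omega, ?_, parent, fun x _ => rfl, rfl⟩
    intro x
    rw [PySem.Dict.getD_insert]
    by_cases hx : x = v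
    · simp [hx, hvnotmem]
    · rw [if_neg hx, hiff x]
      simp [hx]
  · -- neighbour step
    have hlt : i < (adj.getD v []).length := by omega
    have hdrop : (adj.getD v []).drop i = (adj.getD v [])[i] :: (adj.getD v []).drop (i + 1) :=
      List.drop_eq_getElem_cons hlt
    have hgetD : (adj.getD v []).getD i "" = (adj.getD v [])[i] := List.getD_eq_getElem _ _ hlt
    set nb := (adj.getD v [])[i] with hnb
    rw [hdrop, pvGoNbrs, pvLoopA]
    simp only [if_neg (Nat.not_le.mpr hlt), hgetD]
    rw [pvPathOf_cons]
    by_cases h0 : visit.getD nb 0 = 0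
    · -- unvisited neighbour: push / recurse
      have h01 : ¬ visit.getD nb 0 = 1 := by omega
      simp only [if_pos h0, if_neg h01]
      rw [pvVisitB]
      have hnbnot : nb ∉ pvPathOf rest ++ [v] := by
        intro hm
        have := (hiff nb).2 hm
        omega
      have hinv1 : pvInvS ((nb, 0) :: (v, i + 1) :: rest) (visit.insert nb 1)
          (parent.insert nb (some v)) := by
        refine ⟨?_, ?_, ?_⟩
        · rw [pvPathOf_cons, pvPathOf_cons]
          rw [List.nodup_append]
          exact ⟨hnd, by simp, by
            intro a ha b hb
            simp only [List.mem_singleton] at hb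
            subst hb
            intro he; exact hnbnot (he ▸ ha)⟩
        · intro x
          rw [pvPathOf_cons, pvPathOf_cons, PySem.Dict.getD_insert]
          by_cases hx : x = nb
          · simp [hx]
          · rw [if_neg hx, hiff x]
            simp [hx]
        · rw [pvPathOf_cons, pvPathOf_cons]
          rw [List.isChain_append]
          refine ⟨?_, by simp, ?_⟩
          · refine pvChain_congr _ (fun x hx => ?_) hchain
            rw [PySem.Dict.getD_insert, if_neg]
            intro he; exact hnbnot (he ▸ hx)
          · intro x hx y hy
            simp only [List.head?_cons, Option.mem_def, Option.some.injEq] at hy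
            subst hy
            have hgl : (pvPathOf rest ++ [v]).getLast? = some v := by
              simp [List.getLast?_append]
            rw [hgl] at hx
            simp only [Option.mem_def, Option.some.injEq] at hx
            subst hx
            simp
      have hsp1 := ih f (by omega) nb 0 ((v, i + 1) :: rest) (visit.insert nb 1)
        (parent.insert nb (some v)) hinv1
      rw [List.drop_zero, pvPathOf_cons, pvPathOf_cons] at hsp1
      rcases hv : pvGoNbrs adj f (adj.getD nb []) nb (visit.insert nb 1)
          (pvPathOf rest ++ [v] ++ [nb]) with _ | ⟨f', vis', _ | c⟩
      · -- inner out of fuel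
        rw [hv] at hsp1
        simp only [pvSimPost] at hsp1
        simp only [pvSimPost]
        exact hsp1
      · -- inner finished with no cycle: continue with (v, i+1)
        rw [hv] at hsp1
        simp only [pvSimPost, pvPathOf_cons] at hsp1
        obtain ⟨hf', hiff', p', hag', hra'⟩ := hsp1
        simp only []
        rw [Nat.min_eq_left (by omega : f' ≤ f)]
        have hinv2 : pvInvS ((v, i + 1) :: rest) vis' p' := by
          refine ⟨?_, ?_, ?_⟩
          · rw [pvPathOf_cons]; exact hnd
          · intro x; rw [pvPathOf_cons]; exact hiff' x
          · rw [pvPathOf_cons]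
            refine pvChain_congr _ (fun x hx => ?_) hchain
            rw [hag' x hx, PySem.Dict.getD_insert, if_neg]
            intro he; exact hnbnot (he ▸ hx)
        have hsp2 := ih f' (by omega) v (i + 1) rest vis' p' hinv2
        rw [pvPathOf_cons] at hsp2
        rcases hw : pvGoNbrs adj f' ((adj.getD v []).drop (i + 1)) v vis'
            (pvPathOf rest ++ [v]) with _ | ⟨f'', vis'', _ | c⟩
        · rw [hw] at hsp2
          simp only [pvSimPost] at hsp2
          simp only [pvSimPost]
          rw [hra']; exact hsp2
        · rw [hw] at hsp2
          simp only [pvSimPost] at hsp2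
          simp only [pvSimPost]
          obtain ⟨hf'', hiff'', p'', hag'', hra''⟩ := hsp2
          refine ⟨by omega, hiff'', p'', fun x hx => ?_, by rw [hra']; exact hra''⟩
          rw [hag'' x hx, hag' x (by simp [hx]), PySem.Dict.getD_insert, if_neg]
          intro he
          exact hnbnot (he ▸ (by simp [hx] : x ∈ pvPathOf rest ++ [v]))
        · rw [hw] at hsp2
          simp only [pvSimPost] at hsp2
          simp only [pvSimPost]
          obtain ⟨hc, p'', hra''⟩ := hsp2
          exact ⟨hc, p'', by rw [hra']; exact hra''⟩
      · -- inner found a cycle: propagate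
        rw [hv] at hsp1
        simp only [pvSimPost] at hsp1
        simp only [pvSimPost]
        exact hsp1
    · by_cases h1 : visit.getD nb 0 = 1
      · -- back edge: reconstruct the cycle
        simp only [if_neg h0, if_pos h1]
        simp only [pvSimPost]
        have hmem : nb ∈ pvPathOf rest ++ [v] := (hiff nb).1 h1
        by_cases hveq : nb = v
        · have hidx : PySem.List.index? (pvPathOf rest ++ [v]) nb = some (pvPathOf rest).length := by
            rw [hveq]; exact PySem.List.index?_append_singleton_self (pvPathOf rest) v hvnotmem
          rw [hidx]
          simp only [Option.getD_some, List.drop_left]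
          rw [hveq, pvWalkA_self]
          exact ⟨by simp, parent, by simp⟩
        · have hmem' : nb ∈ pvPathOf rest := by
            rcases List.mem_append.mp hmem with h | h
            · exact h
            · simp at h; exact absurd h hveq
          obtain ⟨pre, suf0, hdec⟩ := List.append_of_mem hmem'
          have hpath2 : pvPathOf rest ++ [v] = pre ++ nb :: (suf0 ++ [v]) := by
            rw [hdec]; simp
          have hnbpre : nb ∉ pre := by
            have h2 : (pre ++ nb :: suf0).Nodup := by rw [← hdec]; exact hnd.of_append_left
            intro hm
            rcases List.nodup_append.mp h2 with ⟨_, _, hdisj⟩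
            exact hdisj nb hm nb (by simp) rfl
          have hidx : PySem.List.index? (pvPathOf rest ++ [v]) nb = some pre.length := by
            rw [PySem.List.index?_eq_some_iff]
            exact ⟨pre, suf0 ++ [v], by rw [hpath2], rfl, hnbpre⟩
          rw [hidx]
          have hlast : (nb :: (suf0 ++ [v])).getLast (by simp) = v := by simp
          have hsuflen : (suf0 ++ [v]).length ≤ rest.length + 1 := by
            have : (pvPathOf rest).length = rest.length := by simp [pvPathOf]
            rw [hdec] at this
            simp at this ⊢
            omega
          have hwalk := pvWalk_gen parent nb (suf0 ++ [v]) pre (rest.length + 1) [v]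
            (by rw [← hpath2]; exact hchain) (by rw [← hpath2]; exact hnd) hsuflen
          rw [hlast] at hwalk
          rw [hwalk]
          have hdl : (nb :: (suf0 ++ [v])).dropLast = nb :: suf0 := by
            rw [show nb :: (suf0 ++ [v]) = (nb :: suf0) ++ [v] by simp, List.dropLast_concat]
          rw [hdl]
          simp only [Option.getD_some]
          rw [hpath2, List.drop_left]
          constructor
          · simp
          · exact ⟨parent, by simp⟩
      · -- already finished neighbour: skip
        simp only [if_neg h0, if_neg h1]
        have hsp := ih f (by omega) v (i + 1) rest visit parent
          ⟨by rw [pvPathOf_cons]; exact hnd, by rw [pvPathOf_cons]; exact hiff,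
           by rw [pvPathOf_cons]; exact hchain⟩
        rw [pvPathOf_cons] at hsp
        exact pvSimPost_mono adj hsp (by omega)

theorem pvPathOf_nil : pvPathOf [] = [] := rfl

theorem pvOuter_eq (adj : PySem.Dict String (List String)) (fuel : Nat) :
    ∀ (nodes : List String) (visit : PySem.Dict String Int)
      (parent : PySem.Dict String (Option String)),
      (∀ x, visit.getD x 0 ≠ 1) →
      pvOuterA adj fuel nodes visit parent = pvOuterB adj fuel nodes visit ∧
      (∀ c, pvOuterB adj fuel nodes visit = some c → 2 ≤ c.length) := by
  intro nodes
  induction nodes with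
  | nil => intro visit parent h1; simp [pvOuterA, pvOuterB]
  | cons s restNodes ihn =>
    intro visit parent h1
    rw [pvOuterA, pvOuterB]
    by_cases hs : visit.getD s 0 ≠ 0
    · simp only [if_pos hs]
      exact ihn visit parent h1
    · simp only [if_neg hs]
      have hinv : pvInvS [(s, 0)] (visit.insert s 1) (parent.insert s none) := by
        refine ⟨by simp [pvPathOf], ?_, by simp [pvPathOf]⟩
        intro x
        simp only [pvPathOf_cons, pvPathOf_nil, List.nil_append, List.mem_singleton]
        rw [PySem.Dict.getD_insert]
        by_cases hx : x = s
        · simp [hx]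
        · simp [hx, h1 x]
      have hsp := pvSim adj fuel s 0 [] (visit.insert s 1) (parent.insert s none) hinv
      rw [pvPathOf_cons, pvPathOf_nil, List.nil_append, List.drop_zero] at hsp
      rw [pvVisitB, List.nil_append]
      rcases hr : pvGoNbrs adj fuel (adj.getD s []) s (visit.insert s 1) [s]
        with _ | ⟨f', vis', _ | c⟩
      · rw [hr] at hsp
        simp only [pvSimPost] at hsp
        rw [hsp]
        exact ⟨rfl, fun c hc => by simp at hc⟩
      · rw [hr] at hsp
        simp only [pvSimPost, pvPathOf_nil] at hsp
        obtain ⟨_, hiff', p', _, hra'⟩ := hsp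
        rw [hra', pvLoopA]
        exact ihn vis' p' (fun x => by have := hiff' x; simp at this; omega)
      · rw [hr] at hsp
        simp only [pvSimPost] at hsp
        obtain ⟨hlen, p', hra'⟩ := hsp
        rw [hra']
        refine ⟨rfl, fun c' hc' => ?_⟩
        simp only [Option.some.injEq] at hc'
        exact hc' ▸ hlen

theorem pvInitVisit_ne_one (l : List String) (x : String) :
    (pvInitVisit l).getD x 0 ≠ 1 := by
  suffices h : ∀ d : PySem.Dict String Int, (∀ y, d.getD y 0 ≠ 1) →
      (l.foldl (fun d n => d.insert n 0) d).getD x 0 ≠ 1 by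
    exact h PySem.Dict.empty (fun y => by simp [PySem.Dict.getD_empty])
  induction l with
  | nil => intro d hd; exact hd x
  | cons a l ihl =>
    intro d hd
    refine ihl (d.insert a 0) (fun y => ?_)
    rw [PySem.Dict.getD_insert]
    by_cases hy : y = a
    · simp [hy]
    · simp [hy, hd y]

theorem pvFind_eq (edges : List (String × String)) :
    pvFindOneDirectedCycleA edges = pvFindOneDirectedCycleB edges ∧
    (∀ c, pvFindOneDirectedCycleB edges = some c → 2 ≤ c.length) := by
  rw [pvFindOneDirectedCycleA, pvFindOneDirectedCycleB]
  exact pvOuter_eq _ _ _ _ _ (fun x => pvInitVisit_ne_one _ x)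

theorem pvDiscard_eq (s : PySem.Set (String × String)) (x : String × String) :
    (if PySem.Set.contains s x then (PySem.Set.remove? s x).getD s else s)
      = PySem.Set.discard s x := by
  by_cases h : x ∈ s
  · simp [PySem.Set.contains, PySem.Set.remove?, PySem.Set.discard, h]
  · simp only [PySem.Set.contains, PySem.Set.remove?, PySem.Set.discard]
    rw [if_neg (by simpa using h), List.filter_eq_self.mpr]
    intro a ha
    simp only [Bool.not_eq_eq_eq_not, Bool.not_true, beq_eq_false_iff_ne, ne_eq]
    intro he; exact h (he ▸ ha)

theorem pvClosingEdge_eq (cs : List String) (h2 : 2 ≤ cs.length) :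
    PySem.List.pyGetD ((PySem.List.pyRange 0 ((cs.length : Int) - 1) 1).foldl
        (fun acc idx => acc ++ [(PySem.List.pyGetD cs idx "", PySem.List.pyGetD cs (idx + 1) "")]) [])
        (-1) ("", "")
      = (PySem.List.pyGetD cs (-2) "", PySem.List.pyGetD cs (-1) "") := by
  rw [PySem.List.foldl_append_singleton_eq_map, List.nil_append]
  have hcast : ((cs.length : Int) - 1) = ((cs.length - 1 : Nat) : Int) := by
    have : 2 ≤ cs.length := h2; omega
  rw [hcast, PySem.List.pyRange_zero_natCast, List.map_map]
  have hlen1 : 1 ≤ cs.length - 1 := by omega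
  have hne : ((List.range (cs.length - 1)).map
      ((fun idx => (PySem.List.pyGetD cs idx "", PySem.List.pyGetD cs (idx + 1) "")) ∘ fun k => ((k : Nat) : Int))) ≠ [] := by
    simp; omega
  rw [PySem.List.pyGetD_neg_one _ _ hne, List.getLast_eq_getElem]
  simp only [List.length_map, List.length_range, List.getElem_map, List.getElem_range,
    Function.comp_apply]
  have hk : cs.length - 1 - 1 = cs.length - 2 := by omega
  rw [hk]
  have e1 : PySem.List.pyGetD cs ((cs.length - 2 : Nat) : Int) "" = cs[cs.length - 2]'(by omega) := by
    rw [PySem.List.pyGetD_natCast, List.getD_eq_getElem]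
  have e2 : PySem.List.pyGetD cs (((cs.length - 2 : Nat) : Int) + 1) "" = cs[cs.length - 1]'(by omega) := by
    have : ((cs.length - 2 : Nat) : Int) + 1 = ((cs.length - 1 : Nat) : Int) := by omega
    rw [this, PySem.List.pyGetD_natCast, List.getD_eq_getElem]
  rw [e1, e2]
  have e3 : PySem.List.pyGetD cs (-2) "" = cs[cs.length - 2]'(by omega) :=
    PySem.List.pyGetD_neg_ofNat cs 2 "" (by omega) (by omega)
  have e4 : PySem.List.pyGetD cs (-1) "" = cs[cs.length - 1]'(by omega) := by
    rw [PySem.List.pyGetD_neg_one _ _ (by intro he; simp [he] at h2)]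
    rw [List.getLast_eq_getElem]
  rw [e3, e4]

-- ===== VERDICT (by name: the statement is the Claim_ definition above) =====
theorem UnfoldOneCycleAutomatically_spec : Claim_equal_UnfoldOneCycleAutomatically := by
  intro edges usedNodeNames _
  unfold Spec_UnfoldOneCycleAutomatically
  obtain ⟨heq, hlen⟩ := pvFind_eq edges
  rw [UnfoldOneCycleAutomatically, UnfoldOneCycleAutomatically_alt, heq]
  rcases hc : pvFindOneDirectedCycleB edges with _ | cyc
  · rfl
  · have h2 := hlen cyc hc
    simp only [pvClosingEdge_eq cyc h2, pvDiscard_eq]
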